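-- pv_equiv track=rewrite | github.com/Wanninors/M2-Code-correcteur | DecodeBch15Serial.py | bch_decode_15_7
-- ===== SOURCE A (Python) =====
-- def bch_decode_15_7(encoded_message):
--     generator = [1, 1, 1, 0, 1, 0, 0, 0, 1]  # g(x) pour BCH(15,7)
--
--     # Calculer le syndrome
--     syndrome = encoded_message[len(encoded_message) - len(generator):]
--
--     # Si le syndrome est nul, pas d'erreur
--     if sum(syndrome) == 0:
--         return encoded_message[:7], "No errors", []
--
--     # Tentative de correction des erreurs pour t=2
--     corrected_message = encoded_message[:]
--     error_positions = []
--     for i in range(len(encoded_message)):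
--         corrected_message[i] ^= 1  # Inverser le bit
--         test_syndrome = corrected_message[len(corrected_message) - len(generator):]
--
--         # Recalculer le syndrome
--         if sum(test_syndrome) == 0:
--             error_positions.append(i)
--             return corrected_message[:7], "Errors corrected", error_positions
--         corrected_message[i] ^= 1  # Restaurer si la correction échoue
--
--     return encoded_message[:7], "Errors detected but not corrected", []
-- ===== SOURCE B (Python) =====
-- def bch_decode_15_7(encoded_message):
--     syndrome = encoded_message[len(encoded_message) - 9:]
--     S = sum(syndrome)
--     if S == 0:
--         return encoded_message[:7], "No errors", []
--     # Flipping the bit at position i shifts the syndrome sum by (bit ^ 1) - bit,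
--     # and only positions under the syndrome window can affect it.
--     window_start = len(encoded_message) - len(syndrome)
--     for i in range(window_start, len(encoded_message)):
--         bit = encoded_message[i]
--         if S + ((bit ^ 1) - bit) == 0:
--             corrected = encoded_message[:]
--             corrected[i] ^= 1
--             return corrected[:7], "Errors corrected", [i]
--     return encoded_message[:7], "Errors detected but not corrected", []
-- ===== Notes on version B (the rewrite author's own statement) =====
-- stated objective: faster
-- what changed: A copies the whole message and, for every index of the message, toggles the bit then re-slices and re-sums the 9-element syndrome window; B sums the window once, scans only the positions under the window with an O(1) toggle-delta test, and copies the list only when a correction is found.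
import Mathlib
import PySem

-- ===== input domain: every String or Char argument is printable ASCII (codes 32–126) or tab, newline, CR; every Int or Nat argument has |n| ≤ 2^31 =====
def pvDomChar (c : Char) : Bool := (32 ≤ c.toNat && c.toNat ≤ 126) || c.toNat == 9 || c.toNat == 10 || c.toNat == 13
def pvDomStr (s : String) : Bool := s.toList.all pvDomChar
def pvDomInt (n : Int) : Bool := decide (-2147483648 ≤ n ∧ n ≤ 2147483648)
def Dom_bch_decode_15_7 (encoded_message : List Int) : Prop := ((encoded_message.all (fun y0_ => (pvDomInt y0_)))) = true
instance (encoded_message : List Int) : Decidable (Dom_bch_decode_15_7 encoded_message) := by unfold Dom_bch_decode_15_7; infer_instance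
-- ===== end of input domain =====

-- B computes the syndrome sum once and scans only the positions under the syndrome window
-- with an O(1) toggle-delta test, instead of A's per-index toggle + re-slice + re-sum over
-- the whole message; B copies the list only when a correction is found.

-- ===== PORT A =====
-- the for-loop of A: cm is corrected_message, i the loop index; orig is the (unmutated) input
def bchLoopA (orig : List Int) (cm : List Int) (i : Nat) : List Int × String × List Int :=
  if h : i < orig.length then
    let cm1 := cm.set i (PySem.Int.bxor (cm.getD i 0) 1)                 -- corrected_message[i] ^= 1
    let ts := PySem.List.slice cm1 (some ((cm1.length : Int) - 9)) none  -- test_syndrome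
    if ts.sum = 0 then
      (PySem.List.slice cm1 none (some 7), "Errors corrected", [(i : Int)])
    else
      bchLoopA orig (cm1.set i (PySem.Int.bxor (cm1.getD i 0) 1)) (i + 1) -- restore, next i
  else
    (PySem.List.slice orig none (some 7), "Errors detected but not corrected", [])
termination_by orig.length - i

def bch_decode_15_7 (encoded_message : List Int) : List Int × String × List Int :=
  let generator : List Int := [1, 1, 1, 0, 1, 0, 0, 0, 1]
  let syndrome := PySem.List.slice encoded_message
      (some ((encoded_message.length : Int) - (generator.length : Int))) none
  if syndrome.sum = 0 then
    (PySem.List.slice encoded_message none (some 7), "No errors", [])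
  else
    bchLoopA encoded_message encoded_message 0

-- ===== PORT B =====
-- Source B's for-loop: i runs from window_start to len(encoded_message)
def bchLoopB (em : List Int) (S : Int) (i : Nat) : List Int × String × List Int :=
  if h : i < em.length then
    let bit := em.getD i 0                                              -- encoded_message[i]
    if S + (PySem.Int.bxor bit 1 - bit) = 0 then
      let corrected := em.set i (PySem.Int.bxor (em.getD i 0) 1)        -- copy; corrected[i] ^= 1
      (PySem.List.slice corrected none (some 7), "Errors corrected", [(i : Int)])
    else
      bchLoopB em S (i + 1)
  else
    (PySem.List.slice em none (some 7), "Errors detected but not corrected", [])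
termination_by em.length - i

def bch_decode_15_7_alt (encoded_message : List Int) : List Int × String × List Int :=
  let syndrome := PySem.List.slice encoded_message
      (some ((encoded_message.length : Int) - 9)) none                  -- encoded_message[len-9:]
  let S := syndrome.sum
  if S = 0 then
    (PySem.List.slice encoded_message none (some 7), "No errors", [])
  else
    let window_start := encoded_message.length - syndrome.length
    bchLoopB encoded_message S window_start

-- ===== PRECONDITION & SPEC =====
def Spec_bch_decode_15_7 (encoded_message : List Int) (out : List Int × String × List Int) : Prop := out = bch_decode_15_7_alt encoded_message
instance (encoded_message : List Int) (out : List Int × String × List Int) : Decidable (Spec_bch_decode_15_7 encoded_message out) := by unfold Spec_bch_decode_15_7; infer_instance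

-- ===== CLAIM =====
def Claim_equal_bch_decode_15_7 : Prop := ∀ (encoded_message : List Int), Dom_bch_decode_15_7 encoded_message → Spec_bch_decode_15_7 encoded_message (bch_decode_15_7 encoded_message)

-- ===== LEMMAS AND PROOFS =====

-- x ^ 1 in Python flips the low bit: +1 on even, -1 on odd (any sign)
theorem bxor_one_eq (x : Int) : PySem.Int.bxor x 1 = if x % 2 = 0 then x + 1 else x - 1 := by
  unfold PySem.Int.bxor
  by_cases hx : 0 ≤ x
  · rw [if_pos hx, if_pos (by norm_num : (0:Int) ≤ 1)]
    obtain ⟨n, rfl⟩ : ∃ n : Nat, x = (n : Int) := ⟨x.toNat, (Int.toNat_of_nonneg hx).symm⟩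
    rw [show ((1:Int).toNat) = 1 from rfl, Int.toNat_natCast]
    rcases Nat.even_or_odd n with h | h
    · obtain ⟨m, rfl⟩ := h
      rw [Nat.xor_one_of_even ⟨m, rfl⟩, if_pos (by push_cast; omega)]
      push_cast; ring
    · obtain ⟨m, rfl⟩ := h
      rw [Nat.xor_one_of_odd ⟨m, rfl⟩, if_neg (by push_cast; omega)]
      push_cast; ring
  · rw [if_neg hx, if_pos (by norm_num : (0:Int) ≤ 1)]
    obtain ⟨n, hn⟩ : ∃ n : Nat, -x - 1 = (n : Int) := ⟨(-x - 1).toNat, (Int.toNat_of_nonneg (by omega)).symm⟩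
    rw [show ((1:Int).toNat) = 1 from rfl, hn, Int.toNat_natCast]
    rcases Nat.even_or_odd n with h | h
    · obtain ⟨m, hm⟩ := h
      rw [Nat.xor_one_of_even ⟨m, hm⟩, if_neg (by omega)]
      push_cast; omega
    · obtain ⟨m, hm⟩ := h
      rw [Nat.xor_one_of_odd ⟨m, hm⟩, if_pos (by omega)]
      push_cast [Nat.succ_sub_one, hm]; omega

theorem bxor_one_bxor_one (x : Int) : PySem.Int.bxor (PySem.Int.bxor x 1) 1 = x := by
  have h1 := bxor_one_eq x
  have h2 := bxor_one_eq (PySem.Int.bxor x 1)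
  rw [h2, h1]; split_ifs <;> omega

theorem getD_set_self (l : List Int) (i : Nat) (h : i < l.length) (a : Int) :
    (l.set i a).getD i 0 = a := by
  simp [List.getD, List.getElem?_set_self h]

theorem set_getD_self (l : List Int) (i : Nat) (h : i < l.length) :
    l.set i (l.getD i 0) = l := by
  rw [List.getD_eq_getElem _ _ h]; exact List.set_getElem_self h

theorem sum_set_of_lt (l : List Int) (i : Nat) (h : i < l.length) (a : Int) :
    (l.set i a).sum = l.sum - l.getD i 0 + a := by
  have hl : l.sum = (l.take i).sum + (l[i] + (l.drop (i+1)).sum) := by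
    conv_lhs => rw [← List.take_append_drop i l, List.sum_append, List.drop_eq_getElem_cons h, List.sum_cons]
  rw [List.sum_set, if_pos h, List.getD_eq_getElem _ _ h, hl]
  ring

theorem getD_drop (l : List Int) (s j : Nat) (h : s + j < l.length) :
    (l.drop s).getD j 0 = l.getD (s + j) 0 := by
  have hj : j < (l.drop s).length := by simp [List.length_drop]; omega
  rw [List.getD_eq_getElem _ _ hj, List.getD_eq_getElem _ _ h, List.getElem_drop]

-- proof-side: first index k ≥ i (and ≥ s) whose toggle zeroes the window sum
def findHit (em : List Int) (S : Int) (s i : Nat) : Option Nat :=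
  if h : i < em.length then
    if s ≤ i ∧ S + (PySem.Int.bxor (em.getD i 0) 1 - em.getD i 0) = 0 then some i
    else findHit em S s (i + 1)
  else none
termination_by em.length - i

theorem findHit_lt (em : List Int) (S : Int) (s : Nat) :
    ∀ i, i ≤ s → findHit em S s i = findHit em S s s := by
  suffices H : ∀ d i, s - i ≤ d → i ≤ s → findHit em S s i = findHit em S s s from
    fun i hi => H s i (by omega) hi
  intro d
  induction d with
  | zero =>
      intro i h1 h2
      have : i = s := by omega
      rw [this]
  | succ d ih =>
      intro i h1 h2
      by_cases he : i = s
      · rw [he]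
      · by_cases h : i < em.length
        · rw [findHit, dif_pos h, if_neg (by omega)]
          exact ih (i + 1) (by omega) (by omega)
        · rw [findHit, dif_neg h, findHit, dif_neg (by omega)]

theorem loopA_eq (em : List Int) (s : Nat) (hs : s = PySem.List.clampIdx em.length ((em.length : Int) - 9))
    (hS : (em.drop s).sum ≠ 0) :
    ∀ i, bchLoopA em em i =
      match findHit em ((em.drop s).sum) s i with
      | some k => ((em.set k (PySem.Int.bxor (em.getD k 0) 1)).take 7, "Errors corrected", [(k : Int)])
      | none => (em.take 7, "Errors detected but not corrected", []) := by
  suffices H : ∀ d i, em.length - i ≤ d → bchLoopA em em i =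
      match findHit em ((em.drop s).sum) s i with
      | some k => ((em.set k (PySem.Int.bxor (em.getD k 0) 1)).take 7, "Errors corrected", [(k : Int)])
      | none => (em.take 7, "Errors detected but not corrected", []) from
    fun i => H em.length i (by omega)
  intro d
  induction d with
  | zero =>
      intro i hle
      rw [bchLoopA, dif_neg (by omega), findHit, dif_neg (by omega)]
      rw [PySem.List.slice_to em (by norm_num : (0:Int) ≤ 7)]
      rfl
  | succ d ih =>
      intro i hle
      rw [bchLoopA, findHit]
      by_cases h : i < em.length
      · rw [dif_pos h, dif_pos h]
        dsimp only
        have hlen : (em.set i (PySem.Int.bxor (em.getD i 0) 1)).length = em.length := by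
          simp
        have hslice : PySem.List.slice (em.set i (PySem.Int.bxor (em.getD i 0) 1))
            (some (((em.set i (PySem.Int.bxor (em.getD i 0) 1)).length : Int) - 9)) none
            = (em.set i (PySem.Int.bxor (em.getD i 0) 1)).drop s := by
          rw [PySem.List.slice_some_none, hlen, ← hs]
        have hrestore : (em.set i (PySem.Int.bxor (em.getD i 0) 1)).set i
            (PySem.Int.bxor ((em.set i (PySem.Int.bxor (em.getD i 0) 1)).getD i 0) 1) = em := by
          rw [getD_set_self em i h, bxor_one_bxor_one, List.set_set, set_getD_self em i h]
        by_cases hcase : s ≤ i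
        · have hjlen : i - s < (em.drop s).length := by simp [List.length_drop]; omega
          have hsum : ((em.set i (PySem.Int.bxor (em.getD i 0) 1)).drop s).sum
              = (em.drop s).sum - em.getD i 0 + PySem.Int.bxor (em.getD i 0) 1 := by
            rw [List.drop_set, if_neg (by omega), sum_set_of_lt _ _ hjlen,
                getD_drop em s (i - s) (by omega), Nat.add_sub_cancel' hcase]
          by_cases hz : (em.drop s).sum + (PySem.Int.bxor (em.getD i 0) 1 - em.getD i 0) = 0
          · conv_rhs => rw [if_pos ⟨hcase, hz⟩]
            rw [hslice, hsum, if_pos (by omega),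
                PySem.List.slice_to _ (by norm_num : (0:Int) ≤ 7)]
            rfl
          · conv_rhs => rw [if_neg (fun hc => hz hc.2)]
            rw [hslice, hsum, if_neg (by omega), hrestore]
            exact ih (i + 1) (by omega)
        · conv_rhs => rw [if_neg (fun hc => hcase hc.1)]
          have hsum : ((em.set i (PySem.Int.bxor (em.getD i 0) 1)).drop s).sum
              = (em.drop s).sum := by
            rw [List.drop_set, if_pos (by omega)]
          rw [hslice, hsum, if_neg hS, hrestore]
          exact ih (i + 1) (by omega)
      · rw [dif_neg h, dif_neg h]
        rw [PySem.List.slice_to em (by norm_num : (0:Int) ≤ 7)]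
        rfl

theorem loopB_eq (em : List Int) (S : Int) (s : Nat) :
    ∀ i, s ≤ i → bchLoopB em S i =
      match findHit em S s i with
      | some k => ((em.set k (PySem.Int.bxor (em.getD k 0) 1)).take 7, "Errors corrected", [(k : Int)])
      | none => (em.take 7, "Errors detected but not corrected", []) := by
  suffices H : ∀ d i, em.length - i ≤ d → s ≤ i → bchLoopB em S i =
      match findHit em S s i with
      | some k => ((em.set k (PySem.Int.bxor (em.getD k 0) 1)).take 7, "Errors corrected", [(k : Int)])
      | none => (em.take 7, "Errors detected but not corrected", []) from
    fun i hi => H em.length i (by omega) hi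
  intro d
  induction d with
  | zero =>
      intro i hle hsi
      rw [bchLoopB, dif_neg (by omega), findHit, dif_neg (by omega)]
      rw [PySem.List.slice_to em (by norm_num : (0:Int) ≤ 7)]
      rfl
  | succ d ih =>
      intro i hle hsi
      rw [bchLoopB, findHit]
      by_cases h : i < em.length
      · rw [dif_pos h, dif_pos h]
        dsimp only
        by_cases hz : S + (PySem.Int.bxor (em.getD i 0) 1 - em.getD i 0) = 0
        · rw [if_pos hz, if_pos ⟨hsi, hz⟩,
              PySem.List.slice_to _ (by norm_num : (0:Int) ≤ 7)]
          rfl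
        · rw [if_neg hz, if_neg (fun hc => hz hc.2)]
          exact ih (i + 1) (by omega) (by omega)
      · rw [dif_neg h, dif_neg h]
        rw [PySem.List.slice_to em (by norm_num : (0:Int) ≤ 7)]
        rfl

theorem main_eq (em : List Int) : bch_decode_15_7 em = bch_decode_15_7_alt em := by
  rw [bch_decode_15_7, bch_decode_15_7_alt]
  dsimp only
  have hgenlen : (([1, 1, 1, 0, 1, 0, 0, 0, 1] : List Int).length : Int) = 9 := by norm_num
  rw [hgenlen, PySem.List.slice_some_none, PySem.List.slice_to em (by norm_num : (0:Int) ≤ 7)]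
  set s := PySem.List.clampIdx em.length ((em.length : Int) - 9) with hsdef
  have hsle : s ≤ em.length := by
    rw [hsdef]; unfold PySem.List.clampIdx; split_ifs <;> omega
  have hws : em.length - (em.drop s).length = s := by
    simp [List.length_drop]; omega
  by_cases hS0 : (em.drop s).sum = 0
  · rw [if_pos hS0, if_pos hS0]
  · rw [if_neg hS0, if_neg hS0, hws,
        loopA_eq em s hsdef hS0 0, findHit_lt em _ s 0 (Nat.zero_le s),
        loopB_eq em _ s s (le_refl s)]

-- ===== VERDICT =====
theorem bch_decode_15_7_spec : Claim_equal_bch_decode_15_7 := by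
  intro em _
  unfold Spec_bch_decode_15_7
  exact main_eq em
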